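-- pv_equiv track=rewrite | github.com/ralskwo/CodingTest | BAEKJOON/2251 - 물통/물통.py | possible_amounts
-- ===== SOURCE A (Python) =====
-- from collections import deque  # deque를 사용하여 BFS 큐를 생성합니다.
--
-- def pour(x, y, max_y):  # 두 물통 사이에서 물을 옮기는 함수입니다.
--     if x + y > max_y:  # 옮길 물의 양이 max_y를 초과하는 경우
--         return x + y - max_y, max_y  # 옮기고 남은 양과 가득 찬 상태를 반환합니다.
--     else:
--         return 0, x + y  # 아니면 x의 모든 물을 y에 옮긴 결과를 반환합니다.
--
-- def possible_amounts(A, B, C):  # 가능한 물의 양을 계산하는 메인 함수입니다.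
--     visited = set()  # 방문한 상태를 저장하기 위한 집합입니다.
--     result = set()  # 결과로 반환할 물의 양을 저장하는 집합입니다.
--     queue = deque([(0, 0, C)])  # 시작 상태 (0, 0, C)를 큐에 추가합니다.
--
--     while queue:  # 큐가 빌 때까지 BFS를 반복합니다.
--         a, b, c = queue.popleft()  # 현재 상태를 큐에서 꺼냅니다.
--
--         if a == 0:  # 첫 번째 물통이 비어 있을 때
--             result.add(c)  # 세 번째 물통의 물의 양을 결과에 추가합니다.
--
--         if (a, b, c) in visited:  # 이미 방문한 상태라면
--             continue  # 스킵하고 다음 상태로 넘어갑니다.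
--         visited.add((a, b, c))  # 현재 상태를 방문 처리합니다.
--
--         na, nb = pour(a, b, B)  # A → B로 물을 옮기기
--         queue.append((na, nb, c))  # 새 상태를 큐에 추가합니다.
--
--         na, nc = pour(a, c, C)  # A → C로 물을 옮기기
--         queue.append((na, b, nc))  # 새 상태를 큐에 추가합니다.
--
--         nb, na = pour(b, a, A)  # B → A로 물을 옮기기
--         queue.append((na, nb, c))  # 새 상태를 큐에 추가합니다.
--
--         nb, nc = pour(b, c, C)  # B → C로 물을 옮기기
--         queue.append((a, nb, nc))  # 새 상태를 큐에 추가합니다.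
--
--         nc, na = pour(c, a, A)  # C → A로 물을 옮기기
--         queue.append((na, b, nc))  # 새 상태를 큐에 추가합니다.
--
--         nc, nb = pour(c, b, B)  # C → B로 물을 옮기기
--         queue.append((a, nb, nc))  # 새 상태를 큐에 추가합니다.
--
--     return sorted(result)  # 결과를 오름차순으로 정렬하여 반환합니다.
-- ===== SOURCE B (Python) =====
-- def possible_amounts(A, B, C):
--     # Fixpoint closure of reachable states, then a separate filter-and-sort pass.
--     def moves(a, b, c):
--         t1 = min(a, B - b)  # A -> B
--         t2 = min(a, C - c)  # A -> C
--         t3 = min(b, A - a)  # B -> A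
--         t4 = min(b, C - c)  # B -> C
--         t5 = min(c, A - a)  # C -> A
--         t6 = min(c, B - b)  # C -> B
--         return [(a - t1, b + t1, c), (a - t2, b, c + t2), (a + t3, b - t3, c),
--                 (a, b - t4, c + t4), (a + t5, b, c - t5), (a, b + t6, c - t6)]
--     reachable = {(0, 0, C)}
--     while True:
--         new = reachable | {t for s in reachable for t in moves(*s)}
--         if new == reachable:
--             break
--         reachable = new
--     return sorted({c for a, b, c in reachable if a == 0})
-- ===== Notes on version B (the rewrite author's own statement) =====
-- stated objective: alternative
-- what changed: Replaces the deque-based BFS (pop a state, collect c when a==0, mark visited, push six pour successors) with a whole-set fixpoint closure that repeatedly applies all six pour transitions (written as transfer amounts t = min(source, space left)) to every reachable state until the set stops growing, followed by a separate filter-and-sort pass over the finished set.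
import Mathlib
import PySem

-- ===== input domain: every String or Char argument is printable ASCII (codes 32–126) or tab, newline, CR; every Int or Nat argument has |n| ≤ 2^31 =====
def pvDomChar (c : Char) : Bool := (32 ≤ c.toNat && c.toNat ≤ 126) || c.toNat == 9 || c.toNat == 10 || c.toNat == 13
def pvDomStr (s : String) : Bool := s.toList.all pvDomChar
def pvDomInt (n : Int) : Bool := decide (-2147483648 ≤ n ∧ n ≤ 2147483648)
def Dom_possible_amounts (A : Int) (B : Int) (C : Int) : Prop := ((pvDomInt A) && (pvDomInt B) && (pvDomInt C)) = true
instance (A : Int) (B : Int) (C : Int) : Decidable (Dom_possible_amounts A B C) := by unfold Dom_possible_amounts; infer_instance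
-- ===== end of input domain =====

-- B replaces A's FIFO/deque BFS (pop a state, collect, mark visited, enqueue six pours)
-- with a whole-set fixpoint closure iterated until the reachable set stops growing, then a
-- separate filter-and-sort pass; objective: alternative decomposition, not claimed faster.


-- ===== PORT A =====
-- pour(x, y, max_y)
def pourA (x y maxy : Int) : Int × Int :=
  if x + y > maxy then (x + y - maxy, maxy) else (0, x + y)

-- the six states appended to the queue in one loop iteration, in A's order
def succsA (A B C : Int) (s : Int × Int × Int) : List (Int × Int × Int) :=
  match s with
  | (a, b, c) =>
    let p1 := pourA a b B
    let p2 := pourA a c C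
    let p3 := pourA b a A
    let p4 := pourA b c C
    let p5 := pourA c a A
    let p6 := pourA c b B
    [(p1.1, p1.2, c), (p2.1, b, p2.2), (p3.2, p3.1, c),
     (a, p4.1, p4.2), (p5.2, b, p5.1), (a, p6.2, p6.1)]

-- number of distinct states with 0 ≤ a ≤ A, 0 ≤ b ≤ B, 0 ≤ c ≤ C
def boxCard (A B C : Int) : Nat := (A + 1).toNat * ((B + 1).toNat * (C + 1).toNat)

-- the 'while queue:' loop; the fuel only totalises it (Python's loop runs forever
-- exactly on the inputs Pre_ excludes, and under Pre_ the fuel provably never runs out)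
def bfsA (A B C : Int) :
    Nat → PySem.Set (Int × Int × Int) → PySem.Set Int → List (Int × Int × Int) → List Int
  | _, _, result, [] => PySem.List.sorted result (fun x => x) false
  | 0, _, result, _ :: _ => PySem.List.sorted result (fun x => x) false
  | fuel + 1, visited, result, (a, b, c) :: rest =>
    let result' := if a = 0 then PySem.Set.add result c else result
    if (a, b, c) ∈ visited then
      bfsA A B C fuel visited result' rest
    else
      bfsA A B C fuel (PySem.Set.add visited (a, b, c)) result'
        (rest ++ succsA A B C (a, b, c))

def possible_amounts (A : Int) (B : Int) (C : Int) : List Int :=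
  bfsA A B C (1 + 6 * boxCard A B C) PySem.Set.empty PySem.Set.empty [(0, 0, C)]

-- ===== PORT B =====
-- the six pour transitions of Source B, via transfer amounts t = min(source, space left)
def movesB (A B C : Int) (s : Int × Int × Int) : List (Int × Int × Int) :=
  match s with
  | (a, b, c) =>
    let t1 := min a (B - b)
    let t2 := min a (C - c)
    let t3 := min b (A - a)
    let t4 := min b (C - c)
    let t5 := min c (A - a)
    let t6 := min c (B - b)
    [(a - t1, b + t1, c), (a - t2, b, c + t2), (a + t3, b - t3, c),
     (a, b - t4, c + t4), (a + t5, b, c - t5), (a, b + t6, c - t6)]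

-- the 'while True:' closure loop of Source B; the fuel only totalises it (see bfsA)
def closeB (A B C : Int) :
    Nat → PySem.Set (Int × Int × Int) → PySem.Set (Int × Int × Int)
  | 0, reachable => reachable
  | fuel + 1, reachable =>
    let newSet := PySem.Set.union reachable (reachable.flatMap (movesB A B C))
    if PySem.Set.equal newSet reachable then reachable
    else closeB A B C fuel newSet

def possible_amounts_alt (A : Int) (B : Int) (C : Int) : List Int :=
  let reachable := closeB A B C (boxCard A B C + 1) (PySem.Set.ofList [(0, 0, C)])
  PySem.List.sorted
    (PySem.Set.ofList (reachable.filterMap (fun s => if s.1 = 0 then some s.2.2 else none)))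
    (fun x => x) false


-- ===== PRECONDITION & SPEC =====
-- Pre_ excludes negative capacities only: there Python A's BFS loop never terminates
-- (pouring keeps producing fresh states), so A returns on no excluded input.
def Pre_possible_amounts (A : Int) (B : Int) (C : Int) : Prop := 0 ≤ A ∧ 0 ≤ B ∧ 0 ≤ C
instance (A : Int) (B : Int) (C : Int) : Decidable (Pre_possible_amounts A B C) := by
  unfold Pre_possible_amounts; infer_instance

def pvWitness_possible_amounts : Int × Int × Int := (8, 9, 10)

def Spec_possible_amounts (A : Int) (B : Int) (C : Int) (out : List Int) : Prop := out = possible_amounts_alt A B C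
instance (A : Int) (B : Int) (C : Int) (out : List Int) : Decidable (Spec_possible_amounts A B C out) := by unfold Spec_possible_amounts; infer_instance

-- ===== CLAIM (what is proved, stated in full; the proofs are below) =====
def Claim_equal_possible_amounts : Prop := ∀ (A : Int) (B : Int) (C : Int), Dom_possible_amounts A B C → Pre_possible_amounts A B C → Spec_possible_amounts A B C (possible_amounts A B C)

-- ===== LEMMAS AND PROOFS =====

-- reachability through the six pour transitions from the start state (0, 0, C)
inductive ReachP (A B C : Int) : Int × Int × Int → Prop
  | start : ReachP A B C (0, 0, C)
  | step {s t : Int × Int × Int} :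
      ReachP A B C s → t ∈ succsA A B C s → ReachP A B C t

-- the state box 0 ≤ a ≤ A, 0 ≤ b ≤ B, 0 ≤ c ≤ C
def InBox (A B C : Int) (s : Int × Int × Int) : Prop :=
  0 ≤ s.1 ∧ s.1 ≤ A ∧ 0 ≤ s.2.1 ∧ s.2.1 ≤ B ∧ 0 ≤ s.2.2 ∧ s.2.2 ≤ C

-- the values A collects: third component of a reachable state with empty first jug
def RC (A B C : Int) (x : Int) : Prop :=
  ∃ s : Int × Int × Int, ReachP A B C s ∧ s.1 = 0 ∧ s.2.2 = x

lemma pourA_fst (x y m : Int) : (pourA x y m).1 = x - min x (m - y) := by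
  simp only [pourA]; split_ifs <;> simp <;> omega

lemma pourA_snd (x y m : Int) : (pourA x y m).2 = y + min x (m - y) := by
  simp only [pourA]; split_ifs <;> simp <;> omega

-- B's min-formulation of pouring computes exactly A's six successor states
lemma moves_eq_succs (A B C : Int) (s : Int × Int × Int) :
    movesB A B C s = succsA A B C s := by
  obtain ⟨a, b, c⟩ := s
  simp only [movesB, succsA, pourA_fst, pourA_snd]

lemma succs_inbox (A B C : Int) (hA : 0 ≤ A) (hB : 0 ≤ B) (hC : 0 ≤ C)
    (s : Int × Int × Int) (hs : InBox A B C s) :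
    ∀ t ∈ succsA A B C s, InBox A B C t := by
  obtain ⟨a, b, c⟩ := s
  obtain ⟨h1, h2, h3, h4, h5, h6⟩ := hs
  intro t ht
  simp only [succsA, List.mem_cons, List.not_mem_nil, or_false] at ht
  simp only [InBox] at *
  rcases ht with h | h | h | h | h | h <;> subst h <;>
    simp only [pourA_fst, pourA_snd] <;>
    refine ⟨by omega, by omega, by omega, by omega, by omega, by omega⟩

lemma nodup_box_length_le (A B C : Int) (l : List (Int × Int × Int))
    (hn : l.Nodup) (hbox : ∀ s ∈ l, InBox A B C s) :
    l.length ≤ boxCard A B C := by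
  classical
  have hsub : l.toFinset ⊆ Finset.Icc 0 A ×ˢ (Finset.Icc 0 B ×ˢ Finset.Icc 0 C) := by
    intro s hs
    have := hbox s (List.mem_toFinset.mp hs)
    obtain ⟨h1, h2, h3, h4, h5, h6⟩ := this
    simp [Finset.mem_product, Finset.mem_Icc]
    exact ⟨⟨h1, h2⟩, ⟨h3, h4⟩, h5, h6⟩
  have hcard := Finset.card_le_card hsub
  rw [List.toFinset_card_of_nodup hn] at hcard
  simpa [Finset.card_product, Int.card_Icc, boxCard] using hcard

-- uniqueness of the answer: a strictly increasing list is determined by its members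
lemma sorted_out_unique (l₁ l₂ : List Int)
    (h₁ : l₁.Pairwise (· < ·)) (h₂ : l₂.Pairwise (· < ·))
    (hm : ∀ x, x ∈ l₁ ↔ x ∈ l₂) : l₁ = l₂ := by
  have hp : l₁.Perm l₂ :=
    (List.perm_ext_iff_of_nodup (h₁.imp ne_of_lt) (h₂.imp ne_of_lt)).mpr hm
  exact PySem.List.eq_of_perm_of_pairwise_le_of_injective (fun x => x)
    (fun a b h => h) hp (h₁.imp le_of_lt) (h₂.imp le_of_lt)

-- A-side: at an empty queue the BFS state determines the answer
lemma bfs_done (A B C : Int) (visited : PySem.Set (Int × Int × Int)) (result : PySem.Set Int)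
    (h4 : ∀ s ∈ visited, ∀ t ∈ succsA A B C s, t ∈ visited)
    (h5 : ∀ s ∈ visited, ReachP A B C s)
    (h7 : (0, 0, C) ∈ visited)
    (h8 : result.Nodup)
    (h9 : ∀ x, x ∈ result ↔ ∃ s ∈ visited, s.1 = 0 ∧ s.2.2 = x) :
    (PySem.List.sorted result (fun x => x) false).Pairwise (· < ·) ∧
      ∀ x, x ∈ PySem.List.sorted result (fun x => x) false ↔ RC A B C x := by
  have hreach_in : ∀ s : Int × Int × Int, ReachP A B C s → s ∈ visited := by
    intro s hr
    induction hr with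
    | start => exact h7
    | step hr' ht ih' => exact h4 _ ih' _ ht
  constructor
  · rw [← PySem.Set.ofList_eq_self_of_nodup result h8]
    exact PySem.List.sorted_ofList_pairwise_lt result
  · intro x
    rw [PySem.List.mem_sorted, h9]
    constructor
    · rintro ⟨s, hs, h0, hc⟩; exact ⟨s, h5 s hs, h0, hc⟩
    · rintro ⟨s, hr, h0, hc⟩; exact ⟨s, hreach_in s hr, h0, hc⟩

-- A-side loop invariant
lemma bfsA_main (A B C : Int) (hA : 0 ≤ A) (hB : 0 ≤ B) (hC : 0 ≤ C) :
    ∀ (fuel : Nat) (visited : PySem.Set (Int × Int × Int)) (result : PySem.Set Int)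
      (queue : List (Int × Int × Int)),
      queue.length + 6 * (boxCard A B C - visited.length) ≤ fuel →
      visited.Nodup →
      (∀ s ∈ visited, InBox A B C s) →
      (∀ s ∈ queue, InBox A B C s) →
      (∀ s ∈ visited, ∀ t ∈ succsA A B C s, t ∈ visited ∨ t ∈ queue) →
      (∀ s ∈ visited, ReachP A B C s) →
      (∀ s ∈ queue, ReachP A B C s) →
      ((0, 0, C) ∈ visited ∨ (0, 0, C) ∈ queue) →
      result.Nodup →
      (∀ x, x ∈ result ↔ ∃ s ∈ visited, s.1 = 0 ∧ s.2.2 = x) →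
      (bfsA A B C fuel visited result queue).Pairwise (· < ·) ∧
        ∀ x, x ∈ bfsA A B C fuel visited result queue ↔ RC A B C x := by
  intro fuel
  induction fuel with
  | zero =>
    intro visited result queue hfuel h1 h2 h3 h4 h5 h6 h7 h8 h9
    have hq : queue = [] := by
      cases queue with
      | nil => rfl
      | cons s rest => simp at hfuel
    subst hq
    rw [bfsA]
    exact bfs_done A B C visited result
      (fun s hs t ht => (h4 s hs t ht).resolve_right (by simp))
      h5 (h7.resolve_right (by simp)) h8 h9
  | succ fuel ih =>
    intro visited result queue hfuel h1 h2 h3 h4 h5 h6 h7 h8 h9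
    cases queue with
    | nil =>
      rw [bfsA]
      exact bfs_done A B C visited result
        (fun s hs t ht => (h4 s hs t ht).resolve_right (by simp))
        h5 (h7.resolve_right (by simp)) h8 h9
    | cons s rest =>
      obtain ⟨a, b, c⟩ := s
      rw [bfsA]
      have hres' : (if a = 0 then PySem.Set.add result c else result).Nodup := by
        by_cases h0 : a = 0 <;> simp only [h0, if_pos] <;>
          first
            | exact PySem.Set.nodup_add _ _ h8
            | exact h8
      have hresmem : ∀ x, x ∈ (if a = 0 then PySem.Set.add result c else result) ↔
          x ∈ result ∨ (a = 0 ∧ x = c) := by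
        intro x
        by_cases h0 : a = 0 <;>
          simp [h0, PySem.Set.mem_add]
      by_cases hv : (a, b, c) ∈ visited
      · simp only [hv, if_pos]
        apply ih visited _ rest
        · simp at hfuel; omega
        · exact h1
        · exact h2
        · exact fun t ht => h3 t (List.mem_cons_of_mem _ ht)
        · intro u hu t ht
          rcases h4 u hu t ht with h | h
          · exact Or.inl h
          · rcases List.mem_cons.mp h with h' | h'
            · exact Or.inl (h' ▸ hv)
            · exact Or.inr h'
        · exact h5
        · exact fun t ht => h6 t (List.mem_cons_of_mem _ ht)
        · rcases h7 with h | h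
          · exact Or.inl h
          · rcases List.mem_cons.mp h with h' | h'
            · exact Or.inl (h' ▸ hv)
            · exact Or.inr h'
        · exact hres'
        · intro x
          rw [hresmem x]
          constructor
          · rintro (hx | ⟨h0, hxc⟩)
            · exact (h9 x).mp hx
            · exact ⟨(a, b, c), hv, h0, hxc.symm⟩
          · rintro ⟨u, hu, h0, hc⟩; exact Or.inl ((h9 x).mpr ⟨u, hu, h0, hc⟩)
      · simp only [hv, if_neg, not_false_iff]
        have hsbox : InBox A B C (a, b, c) := h3 _ (List.mem_cons_self ..)
        have hsreach : ReachP A B C (a, b, c) := h6 _ (List.mem_cons_self ..)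
        have hvnodup : (PySem.Set.add visited (a, b, c)).Nodup :=
          PySem.Set.nodup_add _ _ h1
        have hvbox : ∀ u ∈ PySem.Set.add visited (a, b, c), InBox A B C u := by
          intro u hu
          rcases (PySem.Set.mem_add _ _ _).mp hu with h | h
          · exact h2 u h
          · exact h ▸ hsbox
        have hlenv : (PySem.Set.add visited (a, b, c)).length ≤ boxCard A B C :=
          nodup_box_length_le A B C _ hvnodup hvbox
        have hlen : (PySem.Set.add visited (a, b, c)).length = visited.length + 1 := by
          rw [PySem.Set.add_of_not_mem hv]; simp
        apply ih _ _ (rest ++ succsA A B C (a, b, c))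
        · simp only [List.length_append, List.length_cons] at hfuel ⊢
          have h6len : (succsA A B C (a, b, c)).length = 6 := by
            simp [succsA]
          omega
        · exact hvnodup
        · exact hvbox
        · intro t ht
          rcases List.mem_append.mp ht with h | h
          · exact h3 t (List.mem_cons_of_mem _ h)
          · exact succs_inbox A B C hA hB hC _ hsbox t h
        · intro u hu t ht
          rcases (PySem.Set.mem_add _ _ _).mp hu with h | h
          · rcases h4 u h t ht with h' | h'
            · exact Or.inl ((PySem.Set.mem_add _ _ _).mpr (Or.inl h'))
            · rcases List.mem_cons.mp h' with h'' | h''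
              · exact Or.inl ((PySem.Set.mem_add _ _ _).mpr (Or.inr h''))
              · exact Or.inr (List.mem_append.mpr (Or.inl h''))
          · subst h
            exact Or.inr (List.mem_append.mpr (Or.inr ht))
        · intro u hu
          rcases (PySem.Set.mem_add _ _ _).mp hu with h | h
          · exact h5 u h
          · exact h ▸ hsreach
        · intro t ht
          rcases List.mem_append.mp ht with h | h
          · exact h6 t (List.mem_cons_of_mem _ h)
          · exact ReachP.step hsreach h
        · rcases h7 with h | h
          · exact Or.inl ((PySem.Set.mem_add _ _ _).mpr (Or.inl h))
          · rcases List.mem_cons.mp h with h' | h'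
            · exact Or.inl ((PySem.Set.mem_add _ _ _).mpr (Or.inr h'))
            · exact Or.inr (List.mem_append.mpr (Or.inl h'))
        · exact hres'
        · intro x
          rw [hresmem x]
          constructor
          · rintro (hx | ⟨h0, hxc⟩)
            · obtain ⟨u, hu, h0, hc⟩ := (h9 x).mp hx
              exact ⟨u, (PySem.Set.mem_add _ _ _).mpr (Or.inl hu), h0, hc⟩
            · exact ⟨(a, b, c), (PySem.Set.mem_add _ _ _).mpr (Or.inr rfl), h0, hxc.symm⟩
          · rintro ⟨u, hu, h0, hc⟩
            rcases (PySem.Set.mem_add _ _ _).mp hu with h | h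
            · exact Or.inl ((h9 x).mpr ⟨u, h, h0, hc⟩)
            · subst h
              exact Or.inr ⟨h0, hc.symm⟩

-- B-side loop invariant: the closure returns exactly the reachable states
lemma closeB_main (A B C : Int) (hA : 0 ≤ A) (hB : 0 ≤ B) (hC : 0 ≤ C) :
    ∀ (fuel : Nat) (R : PySem.Set (Int × Int × Int)),
      boxCard A B C + 1 ≤ fuel + R.length →
      R.Nodup →
      (∀ s ∈ R, InBox A B C s) →
      (∀ s ∈ R, ReachP A B C s) →
      (0, 0, C) ∈ R →
      (closeB A B C fuel R).Nodup ∧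
        ∀ s : Int × Int × Int, s ∈ closeB A B C fuel R ↔ ReachP A B C s := by
  intro fuel
  induction fuel with
  | zero =>
    intro R hfuel hn hbox _ _
    exact absurd (nodup_box_length_le A B C R hn hbox) (by omega)
  | succ fuel ih =>
    intro R hfuel hn hbox hreach hstart
    have hsub : R ⊆ PySem.Set.union R (R.flatMap (movesB A B C)) := by
      intro s hs; exact (PySem.Set.mem_union _ _ _).mpr (Or.inl hs)
    have hnodupN : (PySem.Set.union R (R.flatMap (movesB A B C))).Nodup :=
      PySem.Set.nodup_union _ _ hn
    by_cases heq : PySem.Set.equal (PySem.Set.union R (R.flatMap (movesB A B C))) R = true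
    · rw [closeB]
      simp only [heq, if_pos]
      refine ⟨hn, fun s => ⟨fun hs => hreach s hs, fun hr => ?_⟩⟩
      have hclosed : ∀ u ∈ R, ∀ t ∈ succsA A B C u, t ∈ R := by
        intro u hu t ht
        have : t ∈ PySem.Set.union R (R.flatMap (movesB A B C)) := by
          refine (PySem.Set.mem_union _ _ _).mpr (Or.inr ?_)
          exact List.mem_flatMap.mpr ⟨u, hu, by rw [moves_eq_succs]; exact ht⟩
        exact ((PySem.Set.equal_iff _ _).mp heq t).mp this
      induction hr with
      | start => exact hstart
      | step hr' ht ih' => exact hclosed _ ih' _ ht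
    · rw [closeB]
      simp only [heq, if_neg, Bool.false_eq_true, not_false_iff]
      have hlen : R.length < (PySem.Set.union R (R.flatMap (movesB A B C))).length := by
        by_contra hle
        have hperm := (List.subperm_of_subset hn hsub).perm_of_length_le (Nat.le_of_not_lt hle)
        exact (heq ((PySem.Set.equal_iff _ _).mpr (fun x => hperm.symm.mem_iff))).elim
      have hboxN : ∀ s ∈ PySem.Set.union R (R.flatMap (movesB A B C)), InBox A B C s := by
        intro s hs
        rcases (PySem.Set.mem_union _ _ _).mp hs with h | h
        · exact hbox s h
        · obtain ⟨u, hu, hsu⟩ := List.mem_flatMap.mp h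
          rw [moves_eq_succs] at hsu
          exact succs_inbox A B C hA hB hC u (hbox u hu) s hsu
      have hreachN : ∀ s ∈ PySem.Set.union R (R.flatMap (movesB A B C)), ReachP A B C s := by
        intro s hs
        rcases (PySem.Set.mem_union _ _ _).mp hs with h | h
        · exact hreach s h
        · obtain ⟨u, hu, hsu⟩ := List.mem_flatMap.mp h
          rw [moves_eq_succs] at hsu
          exact ReachP.step (hreach u hu) hsu
      exact ih _ (by omega) hnodupN hboxN hreachN (hsub hstart)

lemma alt_good (A B C : Int) (hA : 0 ≤ A) (hB : 0 ≤ B) (hC : 0 ≤ C) :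
    (possible_amounts_alt A B C).Pairwise (· < ·) ∧
      ∀ x, x ∈ possible_amounts_alt A B C ↔ RC A B C x := by
  have h0 : PySem.Set.ofList [((0 : Int), (0 : Int), C)] = [(0, 0, C)] :=
    PySem.Set.ofList_eq_self_of_nodup _ (by simp)
  have hc := closeB_main A B C hA hB hC (boxCard A B C + 1) (PySem.Set.ofList [(0, 0, C)])
    (by rw [h0]; simp)
    (by rw [h0]; simp)
    (by rw [h0]; intro s hs; simp only [List.mem_singleton] at hs; subst hs
        exact ⟨le_refl _, hA, le_refl _, hB, hC, le_refl _⟩)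
    (by rw [h0]; intro s hs; simp only [List.mem_singleton] at hs; subst hs
        exact ReachP.start)
    (by rw [h0]; simp)
  constructor
  · exact PySem.List.sorted_ofList_pairwise_lt _
  · intro x
    unfold possible_amounts_alt
    rw [PySem.List.mem_sorted, PySem.Set.mem_ofList, List.mem_filterMap]
    constructor
    · rintro ⟨s, hs, hf⟩
      by_cases hz : s.1 = 0
      · simp only [hz, if_pos, Option.some.injEq] at hf
        exact ⟨s, (hc.2 s).mp hs, hz, hf⟩
      · simp [hz] at hf
    · rintro ⟨s, hr, hz, hx⟩
      exact ⟨s, (hc.2 s).mpr hr, by simp [hz, hx]⟩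


-- ===== VERDICT (by name: the statement is the Claim_ definition above) =====
theorem possible_amounts_spec : Claim_equal_possible_amounts := by
  intro A B C _hDom hPre
  obtain ⟨hA, hB, hC⟩ := hPre
  have ha := bfsA_main A B C hA hB hC (1 + 6 * boxCard A B C)
      PySem.Set.empty PySem.Set.empty [(0, 0, C)]
      (by simp [PySem.Set.empty])
      (by simp [PySem.Set.empty])
      (by simp [PySem.Set.empty])
      (by intro s hs; simp only [List.mem_singleton] at hs; subst hs; exact ⟨le_refl _, hA, le_refl _, hB, hC, le_refl _⟩)
      (by simp [PySem.Set.empty])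
      (by simp [PySem.Set.empty])
      (by intro s hs; simp only [List.mem_singleton] at hs; subst hs; exact ReachP.start)
      (by simp)
      (by simp [PySem.Set.empty])
      (by simp [PySem.Set.empty])
  have hb := alt_good A B C hA hB hC
  show possible_amounts A B C = possible_amounts_alt A B C
  unfold possible_amounts
  exact sorted_out_unique _ _ ha.1 hb.1 (by intro x; rw [ha.2 x, hb.2 x])
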